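-- pv_equiv track=rewrite | github.com/hearues-zueke-github/python_programs | math_games/langtons_ant_multiple_machines.py | get_amount_of_lengths
-- ===== SOURCE A (Python) =====
-- def get_amount_of_lengths(cell, s_cells):
--     y, x = cell
--
--     i1_1 = 1
--     while True:
--         next_cell = (y, x+i1_1)
--         if not next_cell in s_cells:
--             break
--         i1_1 += 1
--     i1_2 = 1
--     while True:
--         next_cell = (y, x-i1_2)
--         if not next_cell in s_cells:
--             break
--         i1_2 += 1
--
--     i2_1 = 1
--     while True:
--         next_cell = (y+i2_1, x+i2_1)
--         if not next_cell in s_cells: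
--             break
--         i2_1 += 1
--     i2_2 = 1
--     while True:
--         next_cell = (y-i2_2, x-i2_2)
--         if not next_cell in s_cells:
--             break
--         i2_2 += 1
--
--     i3_1 = 1
--     while True:
--         next_cell = (y+i3_1, x)
--         if not next_cell in s_cells:
--             break
--         i3_1 += 1
--     i3_2 = 1
--     while True:
--         next_cell = (y-i3_2, x)
--         if not next_cell in s_cells:
--             break
--         i3_2 += 1
--
--     i4_1 = 1
--     while True:
--         next_cell = (y+i4_1, x-i4_1)
--         if not next_cell in s_cells:
--             break
--         i4_1 += 1
--     i4_2 = 1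
--     while True:
--         next_cell = (y-i4_2, x+i4_2)
--         if not next_cell in s_cells:
--             break
--         i4_2 += 1
--
--     return (i1_1+i1_2-1, i2_1+i2_2-1, i3_1+i3_2-1, i4_1+i4_2-1)
-- ===== SOURCE B (Python) =====
-- def get_amount_of_lengths(cell, s_cells):
--     y, x = cell
--     o1, o2, o3, o4 = set(), set(), set(), set()
--     for (cy, cx) in s_cells:
--         dy = cy - y
--         dx = cx - x
--         if dy == 0 and dx != 0:
--             o1.add(dx)
--         if dy != 0 and dx == dy:
--             o2.add(dy)
--         if dy != 0 and dx == 0: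
--             o3.add(dy)
--         if dy != 0 and dx == -dy:
--             o4.add(dy)
--
--     def run(offs):
--         pos = 0
--         for t in sorted(v for v in offs if v > 0):
--             if t != pos + 1:
--                 break
--             pos = t
--         neg = 0
--         for t in sorted(-v for v in offs if v < 0):
--             if t != neg + 1:
--                 break
--             neg = t
--         return pos + neg + 1
--
--     return (run(o1), run(o2), run(o3), run(o4))
-- ===== Notes on version B (the rewrite author's own statement) =====
-- stated objective: alternative
-- what changed: Instead of A's eight outward cell-by-cell membership walks, B makes one classification pass over s_cells computing each cell's signed offset along whichever of the four axes it shares with cell, then gets each run length by a sort-and-scan consecutive-prefix count over the positive and negated-negative offsets (prefix_pos + prefix_neg + 1).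
import Mathlib
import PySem

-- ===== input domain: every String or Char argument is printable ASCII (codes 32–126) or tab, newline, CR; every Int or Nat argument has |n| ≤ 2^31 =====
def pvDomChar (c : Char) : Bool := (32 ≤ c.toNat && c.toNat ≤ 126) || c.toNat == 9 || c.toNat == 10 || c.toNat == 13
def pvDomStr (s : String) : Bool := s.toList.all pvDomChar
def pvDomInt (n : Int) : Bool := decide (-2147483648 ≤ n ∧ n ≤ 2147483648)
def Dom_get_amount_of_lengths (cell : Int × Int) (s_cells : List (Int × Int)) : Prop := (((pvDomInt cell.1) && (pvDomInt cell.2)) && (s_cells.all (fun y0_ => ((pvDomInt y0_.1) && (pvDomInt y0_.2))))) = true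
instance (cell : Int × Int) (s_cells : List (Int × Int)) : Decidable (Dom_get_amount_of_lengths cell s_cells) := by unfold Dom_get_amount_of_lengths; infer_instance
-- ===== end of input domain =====

-- B replaces A's eight outward membership walks by one classification pass over s_cells
-- (signed axis offsets) followed by a sort-and-scan consecutive-prefix count per axis
-- (objective: alternative algorithm; not claimed faster).

-- ===== PORT A =====
-- A's 'i = 1; while True: if next_cell(i) not in s: break; i += 1' loop; fuel-bounded
-- (fuel s.length+1 always suffices: the consecutive hit cells are distinct members of s).
def pvLoopA (s : List (Int × Int)) (next : Int → Int × Int) : Nat → Int → Int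
  | 0, i => i
  | f + 1, i => if next i ∈ s then pvLoopA s next f (i + 1) else i

def get_amount_of_lengths (cell : Int × Int) (s_cells : List (Int × Int)) : Int × Int × Int × Int :=
  let y := cell.1
  let x := cell.2
  let F := s_cells.length + 1
  let i1_1 := pvLoopA s_cells (fun i => (y, x + i)) F 1
  let i1_2 := pvLoopA s_cells (fun i => (y, x - i)) F 1
  let i2_1 := pvLoopA s_cells (fun i => (y + i, x + i)) F 1
  let i2_2 := pvLoopA s_cells (fun i => (y - i, x - i)) F 1
  let i3_1 := pvLoopA s_cells (fun i => (y + i, x)) F 1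
  let i3_2 := pvLoopA s_cells (fun i => (y - i, x)) F 1
  let i4_1 := pvLoopA s_cells (fun i => (y + i, x - i)) F 1
  let i4_2 := pvLoopA s_cells (fun i => (y - i, x + i)) F 1
  (i1_1 + i1_2 - 1, i2_1 + i2_2 - 1, i3_1 + i3_2 - 1, i4_1 + i4_2 - 1)

-- ===== PORT B =====
-- B's single classification pass: the four offset sets (o1, o2, o3, o4).
def pvClassify (y x : Int) (s : List (Int × Int)) :
    PySem.Set Int × PySem.Set Int × PySem.Set Int × PySem.Set Int :=
  s.foldl (fun o c =>
    let dy := c.1 - y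
    let dx := c.2 - x
    ( (if dy = 0 ∧ dx ≠ 0 then PySem.Set.add o.1 dx else o.1),
      (if dy ≠ 0 ∧ dx = dy then PySem.Set.add o.2.1 dy else o.2.1),
      (if dy ≠ 0 ∧ dx = 0 then PySem.Set.add o.2.2.1 dy else o.2.2.1),
      (if dy ≠ 0 ∧ dx = -dy then PySem.Set.add o.2.2.2 dy else o.2.2.2) ))
    (PySem.Set.empty, PySem.Set.empty, PySem.Set.empty, PySem.Set.empty)

-- B's 'for t in sorted(...): if t != pos + 1: break; pos = t' scan.
def pvScan : List Int → Int → Int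
  | [], pos => pos
  | t :: ts, pos => if t = pos + 1 then pvScan ts t else pos

def pvRun (o : PySem.Set Int) : Int :=
  let p := pvScan (PySem.List.sorted (o.filter (fun v => decide (0 < v))) (fun v => v) false) 0
  let n := pvScan (PySem.List.sorted ((o.filter (fun v => decide (v < 0))).map (fun v => -v)) (fun v => v) false) 0
  p + n + 1

def get_amount_of_lengths_alt (cell : Int × Int) (s_cells : List (Int × Int)) : Int × Int × Int × Int :=
  let y := cell.1
  let x := cell.2
  let o := pvClassify y x s_cells
  (pvRun o.1, pvRun o.2.1, pvRun o.2.2.1, pvRun o.2.2.2)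

-- ===== PRECONDITION & SPEC =====
def Spec_get_amount_of_lengths (cell : Int × Int) (s_cells : List (Int × Int)) (out : Int × Int × Int × Int) : Prop := out = get_amount_of_lengths_alt cell s_cells
instance (cell : Int × Int) (s_cells : List (Int × Int)) (out : Int × Int × Int × Int) : Decidable (Spec_get_amount_of_lengths cell s_cells out) := by unfold Spec_get_amount_of_lengths; infer_instance

-- ===== CLAIM =====
def Claim_equal_get_amount_of_lengths : Prop := ∀ (cell : Int × Int) (s_cells : List (Int × Int)), Dom_get_amount_of_lengths cell s_cells → Spec_get_amount_of_lengths cell s_cells (get_amount_of_lengths cell s_cells)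

-- ===== LEMMAS AND PROOFS =====

theorem pvScan_ge (L : List Int) : ∀ p : Int, p ≤ pvScan L p := by
  induction L with
  | nil => intro p; simp [pvScan]
  | cons t ts ih =>
    intro p
    simp only [pvScan]
    split_ifs with h
    · have := ih t; omega
    · omega

theorem pvScan_prefix (L : List Int) : ∀ p j : Int, p < j → j ≤ pvScan L p → j ∈ L := by
  induction L with
  | nil => intro p j h1 h2; simp [pvScan] at h2; omega
  | cons t ts ih =>
    intro p j h1 h2
    simp only [pvScan] at h2
    split_ifs at h2 with h
    · by_cases hj : j = t
      · simp [hj]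
      · have : j ∈ ts := ih t j (by omega) h2
        simp [this]
    · omega

theorem pvScan_next_not_mem (L : List Int) : ∀ p : Int, L.Pairwise (· < ·) →
    (∀ t ∈ L, p < t) → (pvScan L p + 1) ∉ L := by
  induction L with
  | nil => intro p _ _; simp
  | cons t ts ih =>
    intro p hpw hgt
    have hpw' := (List.pairwise_cons.mp hpw).2
    have htts := (List.pairwise_cons.mp hpw).1
    simp only [pvScan]
    split_ifs with h
    · subst h
      have hm := ih (p + 1) hpw' (fun u hu => htts u hu)
      have hge := pvScan_ge ts (p + 1)
      intro hmem
      rcases List.mem_cons.mp hmem with h1 | h1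
      · omega
      · exact hm h1
    · -- t ≠ p + 1, result is p
      intro hmem
      rcases List.mem_cons.mp hmem with h1 | h1
      · exact h h1.symm
      · have := htts _ h1
        have := hgt t (by simp)
        omega

theorem pvLoopA_eq (s : List (Int × Int)) (next : Int → Int × Int) (m : Int)
    (hpre : ∀ j, 1 ≤ j → j ≤ m → next j ∈ s) (hstop : next (m + 1) ∉ s) :
    ∀ (f : Nat) (i : Int), 1 ≤ i → i ≤ m + 1 → (m + 1 - i).toNat < f →
      pvLoopA s next f i = m + 1 := by
  intro f
  induction f with
  | zero => intro i _ _ hf; omega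
  | succ f ih =>
    intro i hi1 hi2 hf
    simp only [pvLoopA]
    by_cases h : next i ∈ s
    · have hne : i ≠ m + 1 := by intro he; exact hstop (he ▸ h)
      rw [if_pos h]
      exact ih (i + 1) (by omega) (by omega) (by omega)
    · have : i = m + 1 := by
        by_contra hne
        exact h (hpre i hi1 (by omega))
      rw [if_neg h, this]

theorem pv_pigeon (s : List (Int × Int)) (next : Int → Int × Int)
    (hinj : Function.Injective next) (m : Int) (hm : 0 ≤ m)
    (h : ∀ j, 1 ≤ j → j ≤ m → next j ∈ s) : m ≤ s.length := by
  have hsub : (Finset.range m.toNat).image (fun k : Nat => next (k + 1)) ⊆ s.toFinset := by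
    intro u hu
    rcases Finset.mem_image.mp hu with ⟨k, hk, rfl⟩
    have hk' := Finset.mem_range.mp hk
    exact List.mem_toFinset.mpr (h (k + 1) (by omega) (by omega))
  have hcard : ((Finset.range m.toNat).image (fun k : Nat => next (k + 1))).card = m.toNat := by
    rw [Finset.card_image_of_injective _ (fun a b hab => by
      have := hinj hab; omega)]
    simp
  have h1 := Finset.card_le_card hsub
  have h2 := List.toFinset_card_le s
  omega

-- A's break-counter loop equals B's prefix scan + 1, for any strictly increasing list L
-- of positive offsets characterising membership along the walk.
theorem pv_bridge (s : List (Int × Int)) (next : Int → Int × Int)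
    (hinj : Function.Injective next) (L : List Int) (hL : L.Pairwise (· < ·))
    (hpos : ∀ t ∈ L, 0 < t) (hmem : ∀ j : Int, 1 ≤ j → (j ∈ L ↔ next j ∈ s)) :
    pvLoopA s next (s.length + 1) 1 = pvScan L 0 + 1 := by
  set m := pvScan L 0 with hmdef
  have hm0 : 0 ≤ m := pvScan_ge L 0
  have hpre : ∀ j, 1 ≤ j → j ≤ m → next j ∈ s := fun j h1 h2 =>
    (hmem j h1).mp (pvScan_prefix L 0 j (by omega) h2)
  have hstop : next (m + 1) ∉ s := fun hc =>
    pvScan_next_not_mem L 0 hL hpos ((hmem (m + 1) (by omega)).mpr hc)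
  have hle : m ≤ s.length := pv_pigeon s next hinj m hm0 hpre
  exact pvLoopA_eq s next m hpre hstop (s.length + 1) 1 (by omega) (by omega) (by omega)

-- Membership and Nodup of the four offset sets built by the classification pass.
theorem pvClassify_aux (y x : Int) (s : List (Int × Int)) :
    ∀ init : PySem.Set Int × PySem.Set Int × PySem.Set Int × PySem.Set Int,
    (let r := s.foldl (fun o c =>
        let dy := c.1 - y
        let dx := c.2 - x
        ( (if dy = 0 ∧ dx ≠ 0 then PySem.Set.add o.1 dx else o.1),
          (if dy ≠ 0 ∧ dx = dy then PySem.Set.add o.2.1 dy else o.2.1),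
          (if dy ≠ 0 ∧ dx = 0 then PySem.Set.add o.2.2.1 dy else o.2.2.1),
          (if dy ≠ 0 ∧ dx = -dy then PySem.Set.add o.2.2.2 dy else o.2.2.2) )) init
     (∀ t : Int, t ∈ r.1 ↔ t ∈ init.1 ∨ (t ≠ 0 ∧ (y, x + t) ∈ s)) ∧
     (∀ t : Int, t ∈ r.2.1 ↔ t ∈ init.2.1 ∨ (t ≠ 0 ∧ (y + t, x + t) ∈ s)) ∧
     (∀ t : Int, t ∈ r.2.2.1 ↔ t ∈ init.2.2.1 ∨ (t ≠ 0 ∧ (y + t, x) ∈ s)) ∧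
     (∀ t : Int, t ∈ r.2.2.2 ↔ t ∈ init.2.2.2 ∨ (t ≠ 0 ∧ (y + t, x - t) ∈ s)) ∧
     (init.1.Nodup → r.1.Nodup) ∧ (init.2.1.Nodup → r.2.1.Nodup) ∧
     (init.2.2.1.Nodup → r.2.2.1.Nodup) ∧ (init.2.2.2.Nodup → r.2.2.2.Nodup)) := by
  induction s with
  | nil =>
    intro init
    simp [List.foldl]
  | cons c cs ih =>
    obtain ⟨cy, cx⟩ := c
    intro init
    simp only [List.foldl_cons]
    have h := ih (( (if cy - y = 0 ∧ cx - x ≠ 0 then PySem.Set.add init.1 (cx - x) else init.1),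
      (if cy - y ≠ 0 ∧ cx - x = cy - y then PySem.Set.add init.2.1 (cy - y) else init.2.1),
      (if cy - y ≠ 0 ∧ cx - x = 0 then PySem.Set.add init.2.2.1 (cy - y) else init.2.2.1),
      (if cy - y ≠ 0 ∧ cx - x = -(cy - y) then PySem.Set.add init.2.2.2 (cy - y) else init.2.2.2) ))
    obtain ⟨h1, h2, h3, h4, n1, n2, n3, n4⟩ := h
    refine ⟨?_, ?_, ?_, ?_, ?_, ?_, ?_, ?_⟩
    · intro t
      rw [h1 t]
      simp only [List.mem_cons]
      constructor
      · rintro (hin | hr)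
        · by_cases hcond : cy - y = 0 ∧ cx - x ≠ 0
          · rw [if_pos hcond] at hin
            rcases (PySem.Set.mem_add _ _ _).mp hin with hin | rfl
            · exact Or.inl hin
            · exact Or.inr ⟨hcond.2, Or.inl (by rw [Prod.mk.injEq]; omega)⟩
          · rw [if_neg hcond] at hin; exact Or.inl hin
        · exact Or.inr ⟨hr.1, Or.inr hr.2⟩
      · rintro (hin | ⟨ht, hc | hcs⟩)
        · left
          by_cases hcond : cy - y = 0 ∧ cx - x ≠ 0
          · rw [if_pos hcond]; exact (PySem.Set.mem_add _ _ _).mpr (Or.inl hin)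
          · rw [if_neg hcond]; exact hin
        · left
          rw [Prod.mk.injEq] at hc
          rw [if_pos ⟨by omega, by omega⟩]
          exact (PySem.Set.mem_add _ _ _).mpr (Or.inr (by omega))
        · exact Or.inr ⟨ht, hcs⟩
    · intro t
      rw [h2 t]
      simp only [List.mem_cons]
      constructor
      · rintro (hin | hr)
        · by_cases hcond : cy - y ≠ 0 ∧ cx - x = cy - y
          · rw [if_pos hcond] at hin
            rcases (PySem.Set.mem_add _ _ _).mp hin with hin | rfl
            · exact Or.inl hin
            · exact Or.inr ⟨hcond.1, Or.inl (by rw [Prod.mk.injEq]; omega)⟩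
          · rw [if_neg hcond] at hin; exact Or.inl hin
        · exact Or.inr ⟨hr.1, Or.inr hr.2⟩
      · rintro (hin | ⟨ht, hc | hcs⟩)
        · left
          by_cases hcond : cy - y ≠ 0 ∧ cx - x = cy - y
          · rw [if_pos hcond]; exact (PySem.Set.mem_add _ _ _).mpr (Or.inl hin)
          · rw [if_neg hcond]; exact hin
        · left
          rw [Prod.mk.injEq] at hc
          rw [if_pos ⟨by omega, by omega⟩]
          exact (PySem.Set.mem_add _ _ _).mpr (Or.inr (by omega))
        · exact Or.inr ⟨ht, hcs⟩
    · intro t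
      rw [h3 t]
      simp only [List.mem_cons]
      constructor
      · rintro (hin | hr)
        · by_cases hcond : cy - y ≠ 0 ∧ cx - x = 0
          · rw [if_pos hcond] at hin
            rcases (PySem.Set.mem_add _ _ _).mp hin with hin | rfl
            · exact Or.inl hin
            · exact Or.inr ⟨hcond.1, Or.inl (by rw [Prod.mk.injEq]; omega)⟩
          · rw [if_neg hcond] at hin; exact Or.inl hin
        · exact Or.inr ⟨hr.1, Or.inr hr.2⟩
      · rintro (hin | ⟨ht, hc | hcs⟩)
        · left
          by_cases hcond : cy - y ≠ 0 ∧ cx - x = 0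
          · rw [if_pos hcond]; exact (PySem.Set.mem_add _ _ _).mpr (Or.inl hin)
          · rw [if_neg hcond]; exact hin
        · left
          rw [Prod.mk.injEq] at hc
          rw [if_pos ⟨by omega, by omega⟩]
          exact (PySem.Set.mem_add _ _ _).mpr (Or.inr (by omega))
        · exact Or.inr ⟨ht, hcs⟩
    · intro t
      rw [h4 t]
      simp only [List.mem_cons]
      constructor
      · rintro (hin | hr)
        · by_cases hcond : cy - y ≠ 0 ∧ cx - x = -(cy - y)
          · rw [if_pos hcond] at hin
            rcases (PySem.Set.mem_add _ _ _).mp hin with hin | rfl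
            · exact Or.inl hin
            · exact Or.inr ⟨hcond.1, Or.inl (by rw [Prod.mk.injEq]; omega)⟩
          · rw [if_neg hcond] at hin; exact Or.inl hin
        · exact Or.inr ⟨hr.1, Or.inr hr.2⟩
      · rintro (hin | ⟨ht, hc | hcs⟩)
        · left
          by_cases hcond : cy - y ≠ 0 ∧ cx - x = -(cy - y)
          · rw [if_pos hcond]; exact (PySem.Set.mem_add _ _ _).mpr (Or.inl hin)
          · rw [if_neg hcond]; exact hin
        · left
          rw [Prod.mk.injEq] at hc
          rw [if_pos ⟨by omega, by omega⟩]
          exact (PySem.Set.mem_add _ _ _).mpr (Or.inr (by omega))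
        · exact Or.inr ⟨ht, hcs⟩
    · intro hn; apply n1
      show List.Nodup (if cy - y = 0 ∧ cx - x ≠ 0 then PySem.Set.add init.1 (cx - x) else init.1)
      split_ifs
      · exact PySem.Set.nodup_add _ _ hn
      · exact hn
    · intro hn; apply n2
      show List.Nodup (if cy - y ≠ 0 ∧ cx - x = cy - y then PySem.Set.add init.2.1 (cy - y) else init.2.1)
      split_ifs
      · exact PySem.Set.nodup_add _ _ hn
      · exact hn
    · intro hn; apply n3
      show List.Nodup (if cy - y ≠ 0 ∧ cx - x = 0 then PySem.Set.add init.2.2.1 (cy - y) else init.2.2.1)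
      split_ifs
      · exact PySem.Set.nodup_add _ _ hn
      · exact hn
    · intro hn; apply n4
      show List.Nodup (if cy - y ≠ 0 ∧ cx - x = -(cy - y) then PySem.Set.add init.2.2.2 (cy - y) else init.2.2.2)
      split_ifs
      · exact PySem.Set.nodup_add _ _ hn
      · exact hn

-- Per-axis: A's forward+backward loops equal B's pvRun + 1 mismatch handled at the end.
theorem pvRun_props (o : PySem.Set Int) (hnd : o.Nodup) (s : List (Int × Int))
    (g : Int → Int × Int) (hg : Function.Injective g)
    (ho : ∀ t : Int, t ∈ o ↔ (t ≠ 0 ∧ g t ∈ s)) :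
    pvLoopA s (fun i => g i) (s.length + 1) 1
      + pvLoopA s (fun i => g (-i)) (s.length + 1) 1 - 1 = pvRun o := by
  have hnp : (o.filter (fun v => decide (0 < v))).Nodup := hnd.filter _
  have hnn : ((o.filter (fun v => decide (v < 0))).map (fun v => -v)).Nodup :=
    (hnd.filter _).map (fun a b h => by omega)
  have key1 : pvLoopA s (fun i => g i) (s.length + 1) 1
      = pvScan (PySem.List.sorted (o.filter (fun v => decide (0 < v))) (fun v => v) false) 0 + 1 := by
    apply pv_bridge s _ hg
    · have hle := PySem.List.sorted_pairwise (o.filter (fun v => decide (0 < v))) (fun v => v)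
      have hnd' : (PySem.List.sorted (o.filter (fun v => decide (0 < v))) (fun v => v) false).Nodup :=
        (PySem.List.sorted_perm _ _ _).nodup_iff.mpr hnp
      exact (List.Pairwise.and hle hnd').imp (fun h => lt_of_le_of_ne h.1 h.2)
    · intro t ht
      have := (PySem.List.mem_sorted _ _ _ _).mp ht
      have := List.mem_filter.mp this
      simpa using this.2
    · intro j hj
      rw [PySem.List.mem_sorted _ _ _ _, List.mem_filter]
      constructor
      · intro h; exact ((ho j).mp h.1).2
      · intro h
        exact ⟨(ho j).mpr ⟨by omega, h⟩, by simp; omega⟩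
  have key2 : pvLoopA s (fun i => g (-i)) (s.length + 1) 1
      = pvScan (PySem.List.sorted ((o.filter (fun v => decide (v < 0))).map (fun v => -v)) (fun v => v) false) 0 + 1 := by
    apply pv_bridge s _ (fun a b h => by have := hg h; omega)
    · have hle := PySem.List.sorted_pairwise ((o.filter (fun v => decide (v < 0))).map (fun v => -v)) (fun v => v)
      have hnd' := (PySem.List.sorted_perm ((o.filter (fun v => decide (v < 0))).map (fun v => -v)) (fun v => v) false).nodup_iff.mpr hnn
      exact (List.Pairwise.and hle hnd').imp (fun h => lt_of_le_of_ne h.1 h.2)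
    · intro t ht
      have := (PySem.List.mem_sorted _ _ _ _).mp ht
      rcases List.mem_map.mp this with ⟨v, hv, rfl⟩
      have := List.mem_filter.mp hv
      have : (decide (v < 0)) = true := this.2
      simp at this; omega
    · intro j hj
      rw [PySem.List.mem_sorted _ _ _ _, List.mem_map]
      constructor
      · rintro ⟨v, hv, rfl⟩
        have hvm := List.mem_filter.mp hv
        have := (ho v).mp hvm.1
        simpa using this.2
      · intro h
        refine ⟨-j, List.mem_filter.mpr ⟨(ho (-j)).mpr ⟨by omega, by simpa using h⟩, by simp; omega⟩, by omega⟩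
  rw [key1, key2, pvRun]
  ring
-- note: pvRun o = p + n + 1 and (p+1)+(n+1)-1 = p+n+1.

-- ===== VERDICT =====
theorem get_amount_of_lengths_spec : Claim_equal_get_amount_of_lengths := by
  intro cell s_cells _
  unfold Spec_get_amount_of_lengths get_amount_of_lengths get_amount_of_lengths_alt
  obtain ⟨y, x⟩ := cell
  have haux := pvClassify_aux y x s_cells (PySem.Set.empty, PySem.Set.empty, PySem.Set.empty, PySem.Set.empty)
  simp only [pvClassify] at *
  obtain ⟨h1, h2, h3, h4, n1, n2, n3, n4⟩ := haux
  simp only [PySem.Set.empty, List.not_mem_nil, false_or, List.nodup_nil, forall_const] at h1 h2 h3 h4 n1 n2 n3 n4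
  have f1 : (fun i : Int => ((y, x - i) : Int × Int)) = fun i => (y, x + -i) := by
    funext i; rw [sub_eq_add_neg]
  have f2 : (fun i : Int => ((y - i, x - i) : Int × Int)) = fun i => (y + -i, x + -i) := by
    funext i; rw [sub_eq_add_neg, sub_eq_add_neg]
  have f3 : (fun i : Int => ((y - i, x) : Int × Int)) = fun i => (y + -i, x) := by
    funext i; rw [sub_eq_add_neg]
  have f4 : (fun i : Int => ((y - i, x + i) : Int × Int)) = fun i => (y + -i, x - -i) := by
    funext i; rw [sub_eq_add_neg, sub_neg_eq_add]
  have e1 := pvRun_props _ n1 s_cells (fun t => (y, x + t))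
    (fun a b h => by simp [Prod.ext_iff] at h; omega) h1
  have e2 := pvRun_props _ n2 s_cells (fun t => (y + t, x + t))
    (fun a b h => by simp [Prod.ext_iff] at h; omega) h2
  have e3 := pvRun_props _ n3 s_cells (fun t => (y + t, x))
    (fun a b h => by simp [Prod.ext_iff] at h; omega) h3
  have e4 := pvRun_props _ n4 s_cells (fun t => (y + t, x - t))
    (fun a b h => by simp [Prod.ext_iff] at h; omega) h4
  simp only [PySem.Set.empty] at e1 e2 e3 e4 ⊢
  rw [f1, f2, f3, f4, ← e1, ← e2, ← e3, ← e4]
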